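-- pv_equiv track=rewrite | github.com/LunaCompSci/Gettysburg-Word-Analysis | proj9.py | generateSortedList
-- ===== SOURCE A (Python) =====
-- def generateSortedList(uniqueWordSet):
--     uniqueWordListAsList = list(uniqueWordSet)
--
--     for passIdx in range(len(uniqueWordListAsList) - 1): #sorts list into alphabetical order
--          smallestIdx = passIdx
--          for checkIdx in range(passIdx + 1, len(uniqueWordListAsList)):
--              if uniqueWordListAsList[checkIdx] < uniqueWordListAsList[smallestIdx]:
--                  smallestIdx = checkIdx
--          temp = uniqueWordListAsList[passIdx]
--          uniqueWordListAsList[passIdx] = uniqueWordListAsList[smallestIdx]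
--          uniqueWordListAsList[smallestIdx] = temp
--
--     return uniqueWordListAsList
-- ===== SOURCE B (Python) =====
-- def generateSortedList(uniqueWordSet):
--     def merge(left, right):
--         result = []
--         i = 0
--         j = 0
--         while i < len(left) and j < len(right):
--             if left[i] <= right[j]:
--                 result.append(left[i])
--                 i += 1
--             else:
--                 result.append(right[j])
--                 j += 1
--         result.extend(left[i:])
--         result.extend(right[j:])
--         return result
--
--     def msort(lst):
--         if len(lst) <= 1:
--             return lst
--         mid = len(lst) // 2
--         return merge(msort(lst[:mid]), msort(lst[mid:]))
--
--     return msort(list(uniqueWordSet))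
-- ===== Notes on version B (the rewrite author's own statement) =====
-- stated objective: faster
-- what changed: Replaced the in-place selection sort (quadratic repeated minimum scan with swaps) by a recursive top-down merge sort (split in halves, sort each, linear merge).
import Mathlib
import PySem

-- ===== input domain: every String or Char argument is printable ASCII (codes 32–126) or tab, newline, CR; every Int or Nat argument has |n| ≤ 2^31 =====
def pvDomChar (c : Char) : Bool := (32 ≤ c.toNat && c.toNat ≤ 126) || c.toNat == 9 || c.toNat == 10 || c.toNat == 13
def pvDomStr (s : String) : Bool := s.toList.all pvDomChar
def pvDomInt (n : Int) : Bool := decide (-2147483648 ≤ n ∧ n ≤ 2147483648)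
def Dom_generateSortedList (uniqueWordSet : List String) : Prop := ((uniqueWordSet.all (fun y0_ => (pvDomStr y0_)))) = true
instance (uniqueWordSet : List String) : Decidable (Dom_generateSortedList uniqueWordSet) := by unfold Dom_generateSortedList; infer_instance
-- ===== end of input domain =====

-- B replaces A's selection sort (repeated minimum scan with swaps) by a recursive
-- merge sort; a timing run decides whether this is measurably faster.

-- ===== PORT A =====
-- selection sort; all indices used are provably in range, so xs[i] is ported as getD i ""
-- (exact: Python never raises here).

-- inner loop: for checkIdx in range(passIdx + 1, len(xs)), tracking smallestIdx
def pvInnerA (xs : List String) (checkIdx smallestIdx : Nat) : Nat :=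
  if _h : checkIdx < xs.length then
    pvInnerA xs (checkIdx + 1)
      (if xs.getD checkIdx "" < xs.getD smallestIdx "" then checkIdx else smallestIdx)
  else smallestIdx
termination_by xs.length - checkIdx

-- the three assignment statements of A's swap
def pvSwapA (xs : List String) (passIdx smallestIdx : Nat) : List String :=
  let temp := xs.getD passIdx ""
  ((xs.set passIdx (xs.getD smallestIdx "")).set smallestIdx temp)

-- outer loop: for passIdx in range(len(xs) - 1)
def pvOuterA (xs : List String) (passIdx : Nat) : List String :=
  if _h : passIdx + 1 < xs.length then
    pvOuterA (pvSwapA xs passIdx (pvInnerA xs (passIdx + 1) passIdx)) (passIdx + 1)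
  else xs
termination_by xs.length - passIdx
decreasing_by simp [pvSwapA]; omega

def generateSortedList (uniqueWordSet : List String) : List String :=
  pvOuterA uniqueWordSet 0

-- ===== PORT B =====
-- merge of two runs: repeatedly take the smaller front element (left on ties),
-- then append whatever remains — B's while loop plus the two extends
def pvMergeB : List String → List String → List String
  | [], ys => ys
  | x :: xs, [] => x :: xs
  | x :: xs, y :: ys =>
    if x ≤ y then x :: pvMergeB xs (y :: ys) else y :: pvMergeB (x :: xs) ys
termination_by a b => a.length + b.length

-- recursive merge sort: split at the middle, sort the halves, merge
def pvMsortB (l : List String) : List String :=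
  if _h : l.length ≤ 1 then l
  else
    pvMergeB (pvMsortB (l.take (l.length / 2))) (pvMsortB (l.drop (l.length / 2)))
termination_by l.length
decreasing_by
  · simp; omega
  · simp; omega

def generateSortedList_alt (uniqueWordSet : List String) : List String :=
  pvMsortB uniqueWordSet

-- ===== PRECONDITION & SPEC =====
def Spec_generateSortedList (uniqueWordSet : List String) (out : List String) : Prop := out = generateSortedList_alt uniqueWordSet
instance (uniqueWordSet : List String) (out : List String) : Decidable (Spec_generateSortedList uniqueWordSet out) := by unfold Spec_generateSortedList; infer_instance

-- ===== CLAIM (what is proved, stated in full; the proofs are below) =====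
def Claim_equal_generateSortedList : Prop := ∀ (uniqueWordSet : List String), Dom_generateSortedList uniqueWordSet → Spec_generateSortedList uniqueWordSet (generateSortedList uniqueWordSet)

-- ===== LEMMAS AND PROOFS =====

-- ---- B side: merge sort produces a sorted permutation of its input ----
theorem pvMergeB_perm (xs ys : List String) : (pvMergeB xs ys).Perm (xs ++ ys) := by
  fun_induction pvMergeB xs ys with
  | case1 ys => exact List.Perm.refl _
  | case2 x xs => simp
  | case3 x xs y ys hle ih => exact ih.cons x
  | case4 x xs y ys hle ih => exact (ih.cons y).trans (List.perm_middle.symm)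

theorem pvMergeB_sorted (xs ys : List String)
    (hx : xs.Pairwise (· ≤ ·)) (hy : ys.Pairwise (· ≤ ·)) :
    (pvMergeB xs ys).Pairwise (· ≤ ·) := by
  fun_induction pvMergeB xs ys with
  | case1 ys => exact hy
  | case2 x xs => exact hx
  | case3 x xs y ys hle ih =>
      refine List.pairwise_cons.mpr ⟨?_, ih (List.pairwise_cons.mp hx).2 hy⟩
      intro b hb
      have hb' : b ∈ xs ++ (y :: ys) := (pvMergeB_perm _ _).mem_iff.mp hb
      rcases List.mem_append.mp hb' with h | h
      · exact (List.pairwise_cons.mp hx).1 b h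
      · rcases List.mem_cons.mp h with rfl | h
        · exact hle
        · exact le_trans hle ((List.pairwise_cons.mp hy).1 b h)
  | case4 x xs y ys hle ih =>
      have hyx : y ≤ x := le_of_not_ge hle
      refine List.pairwise_cons.mpr ⟨?_, ih hx (List.pairwise_cons.mp hy).2⟩
      intro b hb
      have hb' : b ∈ (x :: xs) ++ ys := (pvMergeB_perm _ _).mem_iff.mp hb
      rcases List.mem_append.mp hb' with h | h
      · rcases List.mem_cons.mp h with rfl | h
        · exact hyx
        · exact le_trans hyx ((List.pairwise_cons.mp hx).1 b h)
      · exact (List.pairwise_cons.mp hy).1 b h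

theorem pvMsortB_perm (l : List String) : (pvMsortB l).Perm l := by
  fun_induction pvMsortB l with
  | case1 l h => exact List.Perm.refl _
  | case2 l h ih1 ih2 =>
      exact (pvMergeB_perm _ _).trans ((ih1.append ih2).trans
        (by rw [List.take_append_drop]))

theorem pvMsortB_sorted (l : List String) : (pvMsortB l).Pairwise (· ≤ ·) := by
  fun_induction pvMsortB l with
  | case1 l h =>
      match l, h with
      | [], _ => simp
      | [a], _ => simp
  | case2 l h ih1 ih2 => exact pvMergeB_sorted _ _ ih1 ih2

-- ---- A side: selection sort produces a sorted permutation of its input ----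
theorem pvInnerA_range (xs : List String) (c s : Nat) (hs : s < xs.length) :
    pvInnerA xs c s < xs.length := by
  fun_induction pvInnerA xs c s with
  | case2 c s h => exact hs
  | case1 c s h ih => exact ih (by split <;> omega)

theorem pvInnerA_ge (xs : List String) (c s : Nat) (hs : s ≤ c) :
    s ≤ pvInnerA xs c s := by
  fun_induction pvInnerA xs c s with
  | case2 c s h => exact le_refl s
  | case1 c s h ih =>
      by_cases hlt : xs.getD c "" < xs.getD s ""
      · simp only [if_pos hlt, dif_pos hlt] at ih ⊢
        exact le_trans hs (ih (by omega))
      · simp only [if_neg hlt, dif_neg hlt] at ih ⊢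
        exact ih (by omega)

theorem pvInnerA_min (xs : List String) (c s : Nat) :
    (xs.getD (pvInnerA xs c s) "" ≤ xs.getD s "") ∧
    (∀ k, c ≤ k → k < xs.length → xs.getD (pvInnerA xs c s) "" ≤ xs.getD k "") := by
  fun_induction pvInnerA xs c s with
  | case2 c s h => exact ⟨le_refl _, fun k hk1 hk2 => absurd (lt_of_le_of_lt hk1 hk2) h⟩
  | case1 c s h ih =>
      by_cases hlt : xs.getD c "" < xs.getD s ""
      · simp only [if_pos hlt, dif_pos hlt] at ih ⊢
        refine ⟨le_trans ih.1 (le_of_lt hlt), ?_⟩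
        intro k hk1 hk2
        rcases Nat.eq_or_lt_of_le hk1 with rfl | hk1'
        · exact ih.1
        · exact ih.2 k hk1' hk2
      · simp only [if_neg hlt, dif_neg hlt] at ih ⊢
        refine ⟨ih.1, ?_⟩
        intro k hk1 hk2
        rcases Nat.eq_or_lt_of_le hk1 with rfl | hk1'
        · exact le_trans ih.1 (le_of_not_gt hlt)
        · exact ih.2 k hk1' hk2

theorem pvSwapA_length (xs : List String) (i j : Nat) :
    (pvSwapA xs i j).length = xs.length := by simp [pvSwapA]

theorem pvSwapA_perm (xs : List String) (i j : Nat) (hi : i < xs.length) (hj : j < xs.length) :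
    (pvSwapA xs i j).Perm xs := by
  by_cases hij : i = j
  · subst hij
    have hg : xs.getD i "" = xs[i] := List.getD_eq_getElem _ _ hi
    simp only [pvSwapA]
    rw [hg, List.set_getElem_self hi, List.set_getElem_self hi]
  · rw [List.perm_iff_count]
    intro a
    simp only [pvSwapA]
    have hxi : xs.getD i "" = xs[i] := List.getD_eq_getElem _ _ hi
    have hxj : xs.getD j "" = xs[j] := List.getD_eq_getElem _ _ hj
    have h2 : j < ((xs.set i (xs.getD j ""))).length := by simpa using hj
    rw [List.count_set h2, List.count_set hi]
    simp only [List.getElem_set_ne hij]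
    simp only [hxi, hxj]
    have hmemi : (if (xs[i] == a) = true then 1 else 0) ≤ List.count a xs := by
      split
      · next hb => exact List.count_pos_iff.mpr (by
          have := List.getElem_mem hi; rwa [eq_of_beq hb] at this)
      · exact Nat.zero_le _
    have hmemj : (if (xs[j] == a) = true then 1 else 0) ≤ List.count a xs := by
      split
      · next hb => exact List.count_pos_iff.mpr (by
          have := List.getElem_mem hj; rwa [eq_of_beq hb] at this)
      · exact Nat.zero_le _
    omega

theorem pvSwapA_take (xs : List String) (i j : Nat) (hij : i ≤ j) :
    (pvSwapA xs i j).take i = xs.take i := by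
  simp only [pvSwapA, List.take_set]
  have l1 : ((List.take i xs).set i (xs.getD j "")).length ≤ j := by simp; omega
  have l2 : (List.take i xs).length ≤ i := by simp
  rw [List.set_eq_of_length_le l1, List.set_eq_of_length_le l2]


theorem pvSwapA_get_fst (xs : List String) (i j : Nat) (hi : i < xs.length) (hj : j < xs.length)
    (h : i < (pvSwapA xs i j).length) : (pvSwapA xs i j)[i] = xs[j] := by
  rcases eq_or_ne j i with hji | hji
  · subst hji
    simp [pvSwapA, List.getElem?_eq_getElem hj]
  · simp only [pvSwapA]
    rw [List.getElem_set_ne hji, List.getElem_set_self, List.getD_eq_getElem _ _ hj]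

theorem mem_drop_iff (l : List String) (i : Nat) (b : String) :
    b ∈ l.drop i ↔ ∃ k, i ≤ k ∧ ∃ h : k < l.length, l[k] = b := by
  rw [List.mem_iff_getElem]
  constructor
  · rintro ⟨j, hj, rfl⟩
    have hj' : i + j < l.length := by simp at hj; omega
    exact ⟨i + j, by omega, hj', (List.getElem_drop ..).symm⟩
  · rintro ⟨k, hk1, hk2, rfl⟩
    have hj : k - i < (l.drop i).length := by simp; omega
    exact ⟨k - i, hj, by rw [List.getElem_drop]; congr 1; omega⟩

theorem pvOuterA_perm (xs : List String) (i : Nat) : (pvOuterA xs i).Perm xs := by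
  fun_induction pvOuterA xs i with
  | case2 xs i h => exact List.Perm.refl _
  | case1 xs i h ih =>
      exact ih.trans (pvSwapA_perm xs i _ (by omega)
        (pvInnerA_range xs (i + 1) i (by omega)))

theorem pvOuterA_sorted (xs : List String) (i : Nat)
    (h1 : (xs.take i).Pairwise (· ≤ ·))
    (h2 : ∀ a ∈ xs.take i, ∀ b ∈ xs.drop i, a ≤ b) :
    (pvOuterA xs i).Pairwise (· ≤ ·) := by
  fun_induction pvOuterA xs i with
  | case2 xs i h =>
      rw [← List.take_append_drop i xs, List.pairwise_append]
      refine ⟨h1, ?_, h2⟩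
      have hlen : (xs.drop i).length ≤ 1 := by simp; omega
      match hd : xs.drop i, hlen with
      | [], _ => simp
      | [a], _ => simp
      | a :: b :: t, hl => simp at hl
  | case1 xs i h ih =>
      set s := pvInnerA xs (i + 1) i with hsdef
      have hi : i < xs.length := by omega
      have hs : s < xs.length := pvInnerA_range xs (i + 1) i hi
      have his : i ≤ s := pvInnerA_ge xs (i + 1) i (by omega)
      have hmin : ∀ b ∈ xs.drop i, xs[s] ≤ b := by
        intro b hb
        rcases (mem_drop_iff xs i b).mp hb with ⟨k, hk1, hk2, rfl⟩
        have hm := pvInnerA_min xs (i + 1) i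
        rw [List.getD_eq_getElem _ _ hs] at hm
        rcases Nat.eq_or_lt_of_le hk1 with rfl | hk1'
        · have h1' := hm.1
          rw [List.getD_eq_getElem _ _ hk2] at h1'
          exact h1'
        · have h2' := hm.2 k hk1' hk2
          rw [List.getD_eq_getElem _ _ hk2] at h2'
          exact h2'
      -- facts about xs' := pvSwapA xs i s
      have hlen' : (pvSwapA xs i s).length = xs.length := pvSwapA_length xs i s
      have htake : (pvSwapA xs i s).take i = xs.take i := pvSwapA_take xs i s his
      have hii : i < (pvSwapA xs i s).length := by omega
      have hgetI : (pvSwapA xs i s)[i]'hii = xs[s] :=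
        pvSwapA_get_fst xs i s hi hs hii
      have hdropPerm : ((pvSwapA xs i s).drop i).Perm (xs.drop i) := by
        have hp : (pvSwapA xs i s).Perm xs := pvSwapA_perm xs i s hi hs
        have heq : (xs.take i ++ (pvSwapA xs i s).drop i) = pvSwapA xs i s := by
          rw [← htake, List.take_append_drop]
        refine (List.perm_append_left_iff (xs.take i)).mp ?_
        rw [heq, List.take_append_drop]
        exact hp
      have hmemS : xs[s] ∈ xs.drop i :=
        (mem_drop_iff xs i _).mpr ⟨s, his, hs, rfl⟩
      have htake1 : (pvSwapA xs i s).take (i + 1) = xs.take i ++ [xs[s]] := by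
        rw [List.take_add_one, htake]
        congr 1
        rw [List.getElem?_eq_getElem (by omega), hgetI]
        rfl
      apply ih
      · rw [htake1, List.pairwise_append]
        refine ⟨h1, by simp, ?_⟩
        intro a ha b hb
        rw [List.mem_singleton] at hb
        subst hb
        exact h2 a ha _ hmemS
      · intro a ha b hb
        have hb' : b ∈ xs.drop i := by
          have : b ∈ (pvSwapA xs i s).drop i := by
            have hd : (pvSwapA xs i s).drop (i + 1) = ((pvSwapA xs i s).drop i).drop 1 := by
              rw [List.drop_drop]
            rw [hd] at hb
            exact List.mem_of_mem_drop hb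
          exact hdropPerm.mem_iff.mp this
        rw [htake1] at ha
        rcases List.mem_append.mp ha with ha' | ha'
        · exact h2 a ha' b hb'
        · rw [List.mem_singleton] at ha'
          subst ha'
          exact hmin b hb'

-- ===== VERDICT (by name: the statement is the Claim_ definition above) =====
theorem generateSortedList_spec : Claim_equal_generateSortedList := by
  intro xs _
  unfold Spec_generateSortedList generateSortedList generateSortedList_alt
  have hA1 : (pvOuterA xs 0).Pairwise (· ≤ ·) := pvOuterA_sorted xs 0 (by simp) (by simp)
  have hA2 : (pvOuterA xs 0).Perm xs := pvOuterA_perm xs 0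
  have hB1 : (pvMsortB xs).Pairwise (· ≤ ·) := pvMsortB_sorted xs
  have hB2 : (pvMsortB xs).Perm xs := pvMsortB_perm xs
  exact List.Perm.eq_of_pairwise
    (fun a b _ _ h1 h2 => le_antisymm h1 h2) hA1 hB1 (hA2.trans hB2.symm)
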